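-- pv_equiv track=rewrite | github.com/qqaazz0222/CodingTest | 프로그래머스/구명보트.py | solution
-- ===== SOURCE A (Python) =====
-- def solution(people, limit):
--     answer = 0
--     while True:
--         if people == []:
--             break
--         p1 = min(people)
--         del people[people.index(p1)]
--         people.sort(reverse=True)
--         for i in people:
--             if p1 + i <= limit:
--                 del people[people.index(i)]
--                 break
--             answer += 1
--     return answer
-- ===== SOURCE B (Python) =====
-- def solution(people, limit):
--     # Sort once ascending.  Round by round: the minimum is the front element;
--     # every remaining element too heavy to pair with it can never pair again
--     # (future minima only grow), so move it once and for all from the back of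
--     # the list into a frozen counter h.  Each round adds h to the answer, and
--     # once only frozen people remain the rounds contribute h-1, h-2, ..., 0,
--     # i.e. h*(h-1)//2 in closed form.
--     a = sorted(people)
--     ans = 0
--     h = 0
--     while a:
--         t = limit - a.pop(0)
--         while a and a[-1] > t:
--             a.pop()
--             h += 1
--         ans += h
--         if a:
--             a.pop()
--     return ans + h * (h - 1) // 2
-- ===== Notes on version B (the rewrite author's own statement) =====
-- stated objective: faster
-- what changed: A re-sorts the whole remaining list and runs min()/list.index() value searches in every round; B sorts once ascending, pops the minimum from the front, permanently moves never-pairable heavy elements from the back into a frozen counter, and finishes the all-frozen tail rounds with the closed form h*(h-1)//2.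
import Mathlib
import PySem

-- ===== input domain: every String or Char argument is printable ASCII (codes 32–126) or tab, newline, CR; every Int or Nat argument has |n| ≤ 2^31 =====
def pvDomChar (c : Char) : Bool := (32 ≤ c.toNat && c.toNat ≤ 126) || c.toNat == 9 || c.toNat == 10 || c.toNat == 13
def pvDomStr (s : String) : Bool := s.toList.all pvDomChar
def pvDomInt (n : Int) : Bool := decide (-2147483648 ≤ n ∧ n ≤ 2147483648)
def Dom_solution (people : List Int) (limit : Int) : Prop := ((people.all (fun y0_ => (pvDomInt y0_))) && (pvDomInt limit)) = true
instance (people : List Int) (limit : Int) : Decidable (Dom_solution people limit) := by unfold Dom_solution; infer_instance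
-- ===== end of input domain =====

-- B replaces A's per-round min/index/re-sort passes with one initial ascending sort, a
-- back-of-list frozen counter and a closed form for the all-frozen tail rounds
-- (objective: faster; measurably so in a timing run). Equivalence is about the RETURN
-- value only: Python A empties the caller's `people` list in place, B does not mutate it.

-- ===== PORT A =====
-- A's inner `for i in people:` loop: count the un-pairable elements, and at the first
-- pairable one delete its first occurrence from the full list and break.
def innerAGo (limit p1 : Int) (full : List Int) : List Int → Int → Int × List Int
  | [], acc => (acc, full)
  | i :: rest, acc =>
      if p1 + i ≤ limit then (acc, (PySem.List.remove? full i).getD full)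
      else innerAGo limit p1 full rest (acc + 1)

-- termination helper for loopA (cited by its decreasing_by)
lemma innerAGo_len (limit p1 : Int) (full : List Int) :
    ∀ scan acc, ((innerAGo limit p1 full scan acc).2).length ≤ full.length := by
  intro scan
  induction scan with
  | nil => intro acc; simp [innerAGo]
  | cons i rest ih =>
    intro acc
    by_cases h : p1 + i ≤ limit
    · by_cases hi : i ∈ full
      · simp [innerAGo, h, PySem.List.remove?_eq_some_erase full i hi]
        exact List.length_erase_le ..
      · simp [innerAGo, h, (PySem.List.remove?_eq_none_iff full i).mpr hi]
    · simpa [innerAGo, h] using ih (acc + 1)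

-- A's while-loop
def loopA (limit : Int) (people : List Int) : Int :=
  if hne : people = [] then 0
  else
    match hm : PySem.List.min? people (fun x => x) with
    | none => 0   -- unreachable: min? = none only on the empty list
    | some p1 =>
      let people2 := PySem.List.sorted ((PySem.List.remove? people p1).getD people) (fun x => x) true
      (innerAGo limit p1 people2 people2 0).1 + loopA limit (innerAGo limit p1 people2 people2 0).2
termination_by people.length
decreasing_by
  have hmem : p1 ∈ people := PySem.List.min?_mem hm
  have h1 : (PySem.List.remove? people p1).getD people = people.erase p1 := by
    rw [PySem.List.remove?_eq_some_erase people p1 hmem]; rfl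
  have h2 := innerAGo_len limit p1 (PySem.List.sorted ((PySem.List.remove? people p1).getD people) (fun x => x) true) (PySem.List.sorted ((PySem.List.remove? people p1).getD people) (fun x => x) true) 0
  have h3 : (PySem.List.sorted ((PySem.List.remove? people p1).getD people) (fun x => x) true).length = (people.erase p1).length := by
    rw [h1]; simp [PySem.List.length_sorted]
  have h4 : (people.erase p1).length < people.length := by
    have := List.length_erase_of_mem hmem
    have hpos : 0 < people.length := List.length_pos_iff.mpr hne
    omega
  omega

def solution (people : List Int) (limit : Int) : Int := loopA limit people

-- ===== PORT B =====
-- B's inner `while a and a[-1] > t: a.pop(); h += 1` loop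
def innerC (t : Int) (a : List Int) (h : Int) : List Int × Int :=
  match hl : a.getLast? with
  | none => (a, h)
  | some x => if t < x then innerC t a.dropLast (h + 1) else (a, h)
termination_by a.length
decreasing_by
  have hne : a ≠ [] := by intro he; subst he; simp at hl
  have : 0 < a.length := List.length_pos_iff.mpr hne
  simp [List.length_dropLast]
  omega

-- unfolding equations of innerC (cited by innerC_len, which loopC's decreasing_by needs)
lemma innerC_nil (t h : Int) : innerC t [] h = ([], h) := by simp [innerC]

lemma innerC_concat (t : Int) (u : List Int) (x : Int) (h : Int) :
    innerC t (u ++ [x]) h = if t < x then innerC t u (h + 1) else (u ++ [x], h) := by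
  rw [innerC]
  split
  · next heq => rw [List.getLast?_concat] at heq; cases heq
  · next y heq =>
    rw [List.getLast?_concat] at heq
    injection heq with heq
    subst heq
    rw [List.dropLast_concat]

-- termination helper for loopC (cited by its decreasing_by)
lemma innerC_len (t : Int) : ∀ (a : List Int) (h : Int), ((innerC t a h).1).length ≤ a.length := by
  intro a
  induction a using List.reverseRecOn with
  | nil => intro h; simp [innerC_nil]
  | append_singleton u x ih =>
    intro h
    rw [innerC_concat]
    split
    · exact le_trans (ih (h + 1)) (by simp)
    · simp

-- B's outer `while a:` loop (a.pop(0) = head/tail, a.pop() = dropLast)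
def loopC (limit : Int) (a : List Int) (h ans : Int) : Int :=
  match a with
  | [] => ans + PySem.Int.floordiv (h * (h - 1)) 2
  | p1 :: rest =>
    let r := innerC (limit - p1) rest h
    if r.1 = [] then loopC limit r.1 r.2 (ans + r.2)
    else loopC limit r.1.dropLast r.2 (ans + r.2)
termination_by a.length
decreasing_by
  · have := innerC_len (limit - p1) rest h
    simp only [List.length_cons]
    omega
  · have h1 := innerC_len (limit - p1) rest h
    have h2 : (innerC (limit - p1) rest h).1.dropLast.length ≤ (innerC (limit - p1) rest h).1.length := by
      simp [List.length_dropLast]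
    simp only [List.length_cons]
    omega

def solution_alt (people : List Int) (limit : Int) : Int :=
  loopC limit (PySem.List.sorted people (fun x => x) false) 0 0

-- ===== PRECONDITION & SPEC =====
def Spec_solution (people : List Int) (limit : Int) (out : Int) : Prop := out = solution_alt people limit
instance (people : List Int) (limit : Int) (out : Int) : Decidable (Spec_solution people limit out) := by unfold Spec_solution; infer_instance

-- ===== CLAIM (what is proved, stated in full; the proofs are below) =====
def Claim_equal_solution : Prop := ∀ (people : List Int) (limit : Int), Dom_solution people limit → Spec_solution people limit (solution people limit)


-- ===== LEMMAS AND PROOFS =====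

-- proof-side intermediate: the round-by-round simulation of A on an ascending list;
-- splitJ counts the pairable prefix of the remaining list
def splitJ (limit p1 : Int) : List Int → Nat
  | [] => 0
  | x :: t => if p1 + x ≤ limit then splitJ limit p1 t + 1 else 0

-- one A-round on a sorted-ascending list: count the un-pairable, remove the partner
def loopB (limit : Int) (rest : List Int) : Int :=
  match rest with
  | [] => 0
  | p1 :: t =>
    ((t.length : Int) - ((splitJ limit p1 t : Nat) : Int)) +
      (if 0 < splitJ limit p1 t then loopB limit (t.eraseIdx (splitJ limit p1 t - 1))
       else loopB limit t)
termination_by rest.length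
decreasing_by
  · have := List.length_eraseIdx (l := t) (i := splitJ limit p1 t - 1)
    simp only [List.length_cons]
    split at this <;> omega
  · simp


lemma splitJ_le (limit p1 : Int) : ∀ t : List Int, splitJ limit p1 t ≤ t.length := by
  intro t
  induction t with
  | nil => simp [splitJ]
  | cons x t ih =>
    by_cases h : p1 + x ≤ limit
    · simp [splitJ, h]; omega
    · simp [splitJ, h]

lemma splitJ_take (limit p1 : Int) :
    ∀ t : List Int, ∀ x ∈ t.take (splitJ limit p1 t), p1 + x ≤ limit := by
  intro t
  induction t with
  | nil => simp
  | cons y t ih =>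
    by_cases h : p1 + y ≤ limit
    · simp only [splitJ, if_pos h, List.take_succ_cons, List.mem_cons]
      rintro x (rfl | hx)
      · exact h
      · exact ih x hx
    · simp [splitJ, h]

lemma splitJ_drop (limit p1 : Int) :
    ∀ t : List Int, t.Pairwise (· ≤ ·) →
      ∀ x ∈ t.drop (splitJ limit p1 t), limit < p1 + x := by
  intro t
  induction t with
  | nil => simp
  | cons y t ih =>
    intro hp
    by_cases h : p1 + y ≤ limit
    · simpa [splitJ, h] using ih (List.Pairwise.of_cons hp)
    · simp only [splitJ, if_neg h, List.drop_zero, List.mem_cons]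
      rintro x (rfl | hx)
      · omega
      · have := (List.pairwise_cons.mp hp).1 x hx
        omega

lemma innerAGo_skip (limit p1 : Int) (full : List Int) :
    ∀ bad rest acc, (∀ x ∈ bad, limit < p1 + x) →
      innerAGo limit p1 full (bad ++ rest) acc =
        innerAGo limit p1 full rest (acc + (bad.length : Int)) := by
  intro bad
  induction bad with
  | nil => intro rest acc _; simp
  | cons b bad ih =>
    intro rest acc hb
    have hb1 : limit < p1 + b := hb b (by simp)
    have : ¬ p1 + b ≤ limit := by omega
    simp only [List.cons_append, innerAGo, if_neg this]
    rw [ih rest (acc + 1) (fun x hx => hb x (by simp [hx]))]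
    congr 1
    simp [List.length_cons]
    ring

-- main equivalence, by strong induction on list length
lemma loopA_eq_loopB (limit : Int) :
    ∀ (n : Nat) (l : List Int), l.length ≤ n →
      loopA limit l = loopB limit (PySem.List.sorted l (fun x => x) false) := by
  intro n
  induction n with
  | zero =>
    intro l hl
    have : l = [] := List.length_eq_zero_iff.mp (Nat.le_zero.mp hl)
    subst this
    rw [loopA.eq_def]
    simp [loopB, PySem.List.sorted]
  | succ n ih =>
    intro l hl
    by_cases hne : l = []
    · subst hne
      rw [loopA.eq_def]
      simp [loopB, PySem.List.sorted]
    · -- decompose the ascending sort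
      obtain ⟨p, t, hs⟩ : ∃ p t, PySem.List.sorted l (fun x => x) false = p :: t := by
        rcases hsl : PySem.List.sorted l (fun x => x) false with _ | ⟨p, t⟩
        · exact absurd ((PySem.List.sorted_eq_nil_iff l _ false).mp hsl) hne
        · exact ⟨p, t, rfl⟩
      have hperm : (p :: t).Perm l := hs ▸ PySem.List.sorted_perm l (fun x => x) false
      have hpair : (p :: t).Pairwise (· ≤ ·) := by
        have := PySem.List.sorted_pairwise l (fun x : Int => x)
        rwa [hs] at this
      have htpair : t.Pairwise (· ≤ ·) := List.Pairwise.of_cons hpair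
      have hpmem : p ∈ l := hperm.mem_iff.mp (by simp)
      -- A's min is p
      obtain ⟨m, hm⟩ : ∃ m, PySem.List.min? l (fun x => x) = some m := by
        rcases hmm : PySem.List.min? l (fun x => x) with _ | m
        · exact absurd ((PySem.List.min?_eq_none_iff l (fun x => x)).mp hmm) hne
        · exact ⟨m, rfl⟩
      have hmp : m = p := by
        have h1 : m ≤ p := PySem.List.min?_isMin hm p hpmem
        have h2 : p ≤ m := PySem.List.key_head_sorted_le l (fun x => x) hs m (PySem.List.min?_mem hm)
        omega
      subst hmp
      -- A's descending re-sort is t.reverse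
      have herase : (PySem.List.remove? l m).getD l = l.erase m := by
        rw [PySem.List.remove?_eq_some_erase l m hpmem]; rfl
      have heperm : (l.erase m).Perm t := by
        have := hperm.symm.erase m
        simpa using this
      have hds : PySem.List.sorted (l.erase m) (fun x => x) true = t.reverse := by
        have hrevpair : (PySem.List.sorted (l.erase m) (fun x => x) true).reverse.Pairwise (· ≤ ·) := by
          have := PySem.List.sorted_pairwise_rev (l.erase m) (fun x : Int => x)
          exact (List.pairwise_reverse).mpr this
        have hp : ((PySem.List.sorted (l.erase m) (fun x => x) true).reverse).Perm t :=
          ((List.reverse_perm _).trans (PySem.List.sorted_perm (l.erase m) (fun x => x) true)).trans heperm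
        have := PySem.List.eq_of_perm_of_pairwise_le_of_injective (fun x : Int => x)
          (fun a b h => h) hp hrevpair htpair
        calc PySem.List.sorted (l.erase m) (fun x => x) true
            = (PySem.List.sorted (l.erase m) (fun x => x) true).reverse.reverse := by simp
          _ = t.reverse := by rw [this]
      set j := splitJ limit m t with hj
      have hjle : j ≤ t.length := splitJ_le limit m t
      have hlt : t.length ≤ n := by
        have := hperm.length_eq
        simp at this
        omega
      -- unfold one round of A
      have hA : loopA limit l =
          (innerAGo limit m t.reverse t.reverse 0).1 +
            loopA limit (innerAGo limit m t.reverse t.reverse 0).2 := by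
        rw [loopA.eq_def]
        simp only [dif_neg hne]
        split
        · next heq => simp [hm] at heq
        · next p1 heq =>
            rw [hm] at heq
            injection heq with heq
            subst heq
            rw [herase, hds]
      -- unfold one round of B
      have hB : loopB limit (PySem.List.sorted l (fun x => x) false) =
          ((t.length : Int) - (j : Int)) +
            (if 0 < j then loopB limit (t.eraseIdx (j - 1)) else loopB limit t) := by
        rw [hs, loopB]
      -- decompose the scan
      have hsplit : t.reverse = (t.drop j).reverse ++ (t.take j).reverse := by
        rw [← List.reverse_append, List.take_append_drop]
      have hbad : ∀ x ∈ (t.drop j).reverse, limit < m + x := by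
        intro x hx
        exact splitJ_drop limit m t htpair x (List.mem_reverse.mp hx)
      rcases Nat.eq_zero_or_pos j with hj0 | hjpos
      · -- no partner this round
        have htake : (t.take j).reverse = [] := by simp [hj0]
        have hscan : innerAGo limit m t.reverse t.reverse 0 = ((t.length : Int), t.reverse) := by
          rw [hsplit, htake, innerAGo_skip limit m _ _ [] 0 hbad]
          simp [innerAGo, hj0]
        rw [hA, hB, hscan]
        have : loopA limit t.reverse = loopB limit (PySem.List.sorted t.reverse (fun x => x) false) :=
          ih t.reverse (by simpa using hlt)
        rw [this, PySem.List.sorted_id_eq_of_perm_of_pairwise t.reverse t (List.reverse_perm t).symm htpair]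
        simp [hj0]
      · -- partner exists: it is t[j-1]
        have hj1 : j - 1 < t.length := by omega
        set v := t[j - 1]'hj1 with hv
        have htake : t.take j = t.take (j - 1) ++ [v] := by
          have : j = (j - 1) + 1 := by omega
          rw [this, List.take_add_one]
          simp [List.getElem?_eq_getElem hj1, hv]
        have hvmem : v ∈ t.take j := by rw [htake]; simp
        have hvle : m + v ≤ limit := splitJ_take limit m t v hvmem
        have hscan : innerAGo limit m t.reverse t.reverse 0 =
            (((t.length : Int) - (j : Int)), (PySem.List.remove? t.reverse v).getD t.reverse) := by
          rw [hsplit, innerAGo_skip limit m _ _ _ 0 hbad, htake]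
          simp only [List.reverse_append, List.reverse_cons, List.reverse_nil, List.nil_append,
            List.cons_append, innerAGo, if_pos hvle]
          congr 1
          simp only [zero_add, List.length_reverse, List.length_drop]
          omega
        have hvmemrev : v ∈ t.reverse := by
          simp only [List.mem_reverse]
          exact List.mem_of_mem_take hvmem
        have hremove : (PySem.List.remove? t.reverse v).getD t.reverse = t.reverse.erase v := by
          rw [PySem.List.remove?_eq_some_erase t.reverse v hvmemrev]; rfl
        -- next states agree after sorting
        have hmid : t = t.take (j - 1) ++ v :: t.drop j := by
          conv_lhs => rw [← List.take_append_drop j t]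
          rw [htake]
          simp
        have hperm2 : (t.reverse.erase v).Perm (t.eraseIdx (j - 1)) := by
          have h1 : (t.reverse.erase v).Perm (t.erase v) := (t.reverse_perm).erase v
          have h2 : t.Perm (v :: (t.take (j - 1) ++ t.drop j)) := by
            conv_lhs => rw [hmid]
            exact List.perm_middle
          have h3 : (t.erase v).Perm ((v :: (t.take (j - 1) ++ t.drop j)).erase v) := h2.erase v
          rw [List.erase_cons_head] at h3
          have h4 : t.eraseIdx (j - 1) = t.take (j - 1) ++ t.drop j := by
            have hjj : j - 1 + 1 = j := by omega
            rw [List.eraseIdx_eq_take_drop_succ, hjj]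
          rw [h4]
          exact h1.trans h3
        have hepair : (t.eraseIdx (j - 1)).Pairwise (· ≤ ·) :=
          List.Pairwise.sublist (List.eraseIdx_sublist t (j - 1)) htpair
        have hsorted2 : PySem.List.sorted (t.reverse.erase v) (fun x => x) false = t.eraseIdx (j - 1) :=
          PySem.List.sorted_id_eq_of_perm_of_pairwise _ _ hperm2.symm hepair
        have hlen2 : (t.reverse.erase v).length ≤ n := by
          have h5 : (t.reverse.erase v).length ≤ t.reverse.length := List.length_erase_le
          simp at h5
          omega
        rw [hA, hB, hscan]
        simp only [hremove]
        rw [ih _ hlen2, hsorted2, if_pos hjpos]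

-- plain unfoldings of the two loops on the empty list
lemma loopB_nil (limit : Int) : loopB limit [] = 0 := by
  rw [loopB.eq_def]

lemma loopC_nil (limit h ans : Int) :
    loopC limit [] h ans = ans + PySem.Int.floordiv (h * (h - 1)) 2 := by
  rw [loopC.eq_def]

-- innerC does nothing when the last element is light enough
lemma innerC_stop (t : Int) (u : List Int) (h : Int)
    (hu : ∀ y, u.getLast? = some y → y ≤ t) : innerC t u h = (u, h) := by
  rw [innerC]
  split
  · rfl
  · next y heq => rw [if_neg (by have := hu y heq; omega)]

-- innerC pops exactly the maximal all-heavy suffix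
lemma innerC_spec (t : Int) :
    ∀ (v u : List Int) (h : Int), (∀ x ∈ v, t < x) →
      (∀ y, u.getLast? = some y → y ≤ t) →
      innerC t (u ++ v) h = (u, h + (v.length : Int)) := by
  intro v
  induction v using List.reverseRecOn with
  | nil =>
    intro u h _ hu
    rw [List.append_nil, innerC_stop t u h hu]
    simp
  | append_singleton v x ih =>
    intro u h hv hu
    have hx : t < x := hv x (by simp)
    rw [show u ++ (v ++ [x]) = (u ++ v) ++ [x] by simp, innerC_concat, if_pos hx]
    rw [ih u (h + 1) (fun y hy => hv y (by simp [hy])) hu]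
    congr 1
    simp
    ring

-- appending elements that can never pair does not move the split point
lemma splitJ_append (limit p1 : Int) :
    ∀ (u v : List Int), (∀ x ∈ v, ¬ (p1 + x ≤ limit)) →
      splitJ limit p1 (u ++ v) = splitJ limit p1 u := by
  intro u
  induction u with
  | nil =>
    intro v hv
    cases v with
    | nil => rfl
    | cons x v => simp [splitJ, hv x (by simp)]
  | cons y u ih =>
    intro v hv
    by_cases h : p1 + y ≤ limit <;> simp [splitJ, h, ih v hv]

-- (k+1)·k/2 = k + k·(k-1)/2, in Python's floor division
lemma floordiv_tri (k : Int) :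
    k + PySem.Int.floordiv (k * (k - 1)) 2 = PySem.Int.floordiv ((k + 1) * k) 2 := by
  rcases Int.even_mul_pred_self k with ⟨m, hm⟩
  have e1 : PySem.Int.floordiv (k * (k - 1)) 2 = k * (k - 1) / 2 := by
    unfold PySem.Int.floordiv
    rw [Int.fdiv_eq_ediv]
    simp
  have e2 : PySem.Int.floordiv ((k + 1) * k) 2 = (k + 1) * k / 2 := by
    unfold PySem.Int.floordiv
    rw [Int.fdiv_eq_ediv]
    simp
  have h2 : (k + 1) * k = k * (k - 1) + 2 * k := by ring
  rw [e1, e2, h2]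
  omega

-- the endgame: a list of mutually un-pairable people contributes n(n-1)/2
lemma loopB_frozen (limit : Int) :
    ∀ F : List Int, (∀ f ∈ F, ∀ x ∈ F, limit < x + f) →
      loopB limit F = PySem.Int.floordiv ((F.length : Int) * ((F.length : Int) - 1)) 2 := by
  intro F
  induction F with
  | nil =>
    intro _
    rw [loopB_nil]
    simp [PySem.Int.floordiv]
  | cons p t ih =>
    intro hF
    have hj : splitJ limit p t = 0 := by
      cases t with
      | nil => rfl
      | cons x t' =>
        have : limit < p + x := hF x (by simp) p (by simp)
        simp [splitJ]
        omega
    rw [loopB, hj]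
    simp only [Nat.lt_irrefl, if_false, CharP.cast_eq_zero, sub_zero]
    rw [ih (fun f hf x hx => hF f (by simp [hf]) x (by simp [hx]))]
    have := floordiv_tri (t.length : Int)
    simp only [List.length_cons]
    push_cast
    rw [show ((t.length : Int) + 1 - 1) = (t.length : Int) from by ring]
    omega

-- main bridge: loopC with h frozen people equals loopB on the list with them re-attached
lemma loopC_eq_loopB (limit : Int) :
    ∀ (n : Nat) (w F : List Int) (ans : Int), w.length + F.length ≤ n →
      (w ++ F).Pairwise (· ≤ ·) →
      (∀ f ∈ F, ∀ x ∈ w ++ F, limit < x + f) →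
      loopC limit w (F.length : Int) ans = ans + loopB limit (w ++ F) := by
  intro n
  induction n with
  | zero =>
    intro w F ans hlen _ _
    have hw : w = [] := by cases w <;> simp_all
    have hF : F = [] := by cases F <;> simp_all
    subst hw; subst hF
    rw [loopC_nil]
    simp only [List.nil_append]
    rw [loopB_nil]
    norm_num [PySem.Int.floordiv]
  | succ n ih =>
    intro w F ans hlen hpair hinv
    cases w with
    | nil =>
      rw [loopC_nil, List.nil_append]
      rw [loopB_frozen limit F (fun f hf x hx => hinv f hf x (by simpa using hx))]
    | cons p w' =>
      have hpw : ∀ x ∈ w' ++ F, p ≤ x := (List.pairwise_cons.mp (by simpa using hpair)).1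
      have htp : (w' ++ F).Pairwise (· ≤ ·) := (List.pairwise_cons.mp (by simpa using hpair)).2
      have hw'pair : w'.Pairwise (· ≤ ·) := (List.pairwise_append.mp htp).1
      set j := splitJ limit p w' with hj
      have hjle : j ≤ w'.length := splitJ_le limit p w'
      -- the heavy suffix of w' and all of F can never pair with p
      have hdrop : ∀ x ∈ w'.drop j, limit - p < x := by
        intro x hx
        have := splitJ_drop limit p w' hw'pair x hx
        omega
      have hFheavy : ∀ x ∈ F, limit - p < x := by
        intro x hx
        have := hinv x hx p (by simp)
        omega
      -- the inner while pops exactly drop j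
      have hinner : innerC (limit - p) w' (F.length : Int) =
          (w'.take j, (F.length : Int) + ((w'.length - j : Nat) : Int)) := by
        have hspec := innerC_spec (limit - p) (w'.drop j) (w'.take j) (F.length : Int)
          hdrop
          (by
            intro y hy
            have hmem := List.mem_of_getLast? hy
            have := splitJ_take limit p w' y hmem
            omega)
        rw [List.take_append_drop] at hspec
        rw [hspec]
        simp
      -- the corresponding loopB round has the same split point
      have hsplitJ2 : splitJ limit p (w' ++ F) = j := by
        rw [show w' ++ F = (w'.take j ++ w'.drop j) ++ F by rw [List.take_append_drop],
          List.append_assoc]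
        rw [splitJ_append limit p _ _ (by
          intro x hx
          rcases List.mem_append.mp hx with hx | hx
          · have := hdrop x hx; omega
          · have := hFheavy x hx; omega)]
        conv_rhs => rw [hj, ← List.take_append_drop j w']
        rw [splitJ_append limit p _ _ (by intro x hx; have := hdrop x hx; omega)]
      have hB : loopB limit ((p :: w') ++ F) =
          (((w' ++ F).length : Int) - (j : Int)) +
            (if 0 < j then loopB limit ((w' ++ F).eraseIdx (j - 1)) else loopB limit (w' ++ F)) := by
        rw [List.cons_append, loopB, hsplitJ2]
      rcases Nat.eq_zero_or_pos j with hj0 | hjpos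
      · -- no partner this round: everything remaining freezes
        have hA2 : w'.take j = [] := by simp [hj0]
        have hh : (F.length : Int) + ((w'.length - j : Nat) : Int) = ((w' ++ F).length : Int) := by
          simp only [List.length_append]
          omega
        rw [loopC]
        simp only [hinner, hA2, reduceIte]
        rw [hh]
        rw [ih [] (w' ++ F) (ans + ((w' ++ F).length : Int))
          (by
            simp only [List.length_nil, List.length_append]
            simp only [List.length_cons] at hlen
            omega)
          (by simpa using htp)
          (by
            intro f hf x hx
            simp only [List.nil_append] at hx
            rcases List.mem_append.mp hf with hf | hf
            · have h1 := hdrop f (by simpa [hj0] using hf)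
              have h2 := hpw x hx
              omega
            · exact hinv f (by simp [hf]) x (by
                simp only [List.cons_append, List.mem_cons]
                right
                simpa using hx))]
        rw [hB, if_neg (by omega)]
        simp only [List.nil_append, hj0]
        push_cast
        ring
      · -- partner exists: the last element of take j is popped
        have htjne : w'.take j ≠ [] := by
          intro he
          have := congrArg List.length he
          simp only [List.length_take, List.length_nil] at this
          omega
        have hdl : (w'.take j).dropLast = w'.take (j - 1) := by
          rw [List.dropLast_eq_take, List.take_take, List.length_take]
          congr 1
          omega
        have herase : (w' ++ F).eraseIdx (j - 1) = w'.take (j - 1) ++ (w'.drop j ++ F) := by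
          rw [List.eraseIdx_append_of_lt_length (by omega) F,
            List.eraseIdx_eq_take_drop_succ,
            show j - 1 + 1 = j by omega, List.append_assoc]
        have hsub := List.eraseIdx_sublist (w' ++ F) (j - 1)
        rw [herase] at hsub
        have hh2 : (F.length : Int) + ((w'.length - j : Nat) : Int) =
            ((w'.drop j ++ F).length : Int) := by
          simp only [List.length_append, List.length_drop]
          omega
        rw [loopC]
        simp only [hinner]
        rw [if_neg htjne, hdl, hh2]
        rw [ih (w'.take (j - 1)) (w'.drop j ++ F) (ans + ((w'.drop j ++ F).length : Int))
          (by
            simp only [List.length_take, List.length_append, List.length_drop]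
            simp only [List.length_cons] at hlen
            omega)
          (htp.sublist hsub)
          (by
            intro f hf x hx
            rcases List.mem_append.mp hf with hf | hf
            · have h1 := hdrop f hf
              have h2 := hpw x (hsub.subset hx)
              omega
            · exact hinv f (by simp [hf]) x (by
                have := hsub.subset hx
                simp only [List.cons_append, List.mem_cons]
                right
                simpa using this))]
        rw [hB, if_pos hjpos, herase]
        simp only [List.length_append, List.length_drop]
        push_cast
        omega

-- ===== VERDICT (by name: the statement is the Claim_ definition above) =====
theorem solution_spec : Claim_equal_solution := by
  intro people limit _
  unfold Spec_solution solution solution_alt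
  rw [loopA_eq_loopB limit people.length people (le_refl _)]
  have h := loopC_eq_loopB limit (PySem.List.sorted people (fun x => x) false).length
    (PySem.List.sorted people (fun x => x) false) [] 0 (by simp)
    (by simpa using PySem.List.sorted_pairwise people (fun x : Int => x))
    (by simp)
  simp only [List.append_nil, List.length_nil, Nat.cast_zero] at h
  rw [h]
  ring
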